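-- pv_equiv track=rewrite | github.com/dxa4481/hiragana-flashcards | numbers/generate_numbers_audio_fixed.py | number_to_japanese_hiragana
-- ===== SOURCE A (Python) =====
-- def number_to_japanese_hiragana(num):
--     """Convert number to Japanese hiragana representation for proper TTS pronunciation."""
--     if num == 0:
--         return "ぜろ"
--
--     # Japanese number system using hiragana for proper pronunciation
--     units = ["", "いち", "に", "さん", "よん", "ご", "ろく", "なな", "はち", "きゅう"]
--     tens = ["", "じゅう", "にじゅう", "さんじゅう", "よんじゅう", "ごじゅう", "ろくじゅう", "ななじゅう", "はちじゅう", "きゅうじゅう"]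
--
--     if num < 10:
--         return units[num]
--     elif num < 100:
--         if num % 10 == 0:
--             return tens[num // 10]
--         else:
--             if num // 10 == 1:
--                 # For 11-19, just say じゅう + unit
--                 return "じゅう" + units[num % 10]
--             else:
--                 return tens[num // 10] + units[num % 10]
--     elif num < 1000:
--         hundreds_digit = num // 100
--         remainder = num % 100
--
--         if hundreds_digit == 1:
--             result = "ひゃく"
--         elif hundreds_digit == 3:
--             result = "さんびゃく"  # Special pronunciation
--         elif hundreds_digit == 6:
--             result = "ろっぴゃく"  # Special pronunciation
--         elif hundreds_digit == 8:
--             result = "はっぴゃく"  # Special pronunciation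
--         else:
--             result = units[hundreds_digit] + "ひゃく"
--
--         if remainder > 0:
--             result += number_to_japanese_hiragana(remainder)
--
--         return result
--     elif num < 10000:
--         thousands_digit = num // 1000
--         remainder = num % 1000
--
--         if thousands_digit == 1:
--             result = "せん"
--         elif thousands_digit == 3:
--             result = "さんぜん"  # Special pronunciation
--         elif thousands_digit == 8:
--             result = "はっせん"  # Special pronunciation
--         else:
--             result = units[thousands_digit] + "せん"
--
--         if remainder > 0:
--             result += number_to_japanese_hiragana(remainder)
--
--         return result
--     else:
--         return "いちまん"
-- ===== SOURCE B (Python) =====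
-- def number_to_japanese_hiragana(num):
--     """Convert number to Japanese hiragana representation for proper TTS pronunciation."""
--     if num == 0:
--         return "ぜろ"
--     units = ["", "いち", "に", "さん", "よん", "ご", "ろく", "なな", "はち", "きゅう"]
--     if num < 10:
--         return units[num]
--     if num >= 10000:
--         return "いちまん"
--     hundreds = {1: "ひゃく", 3: "さんびゃく", 6: "ろっぴゃく", 8: "はっぴゃく"}
--     thousands = {1: "せん", 3: "さんぜん", 8: "はっせん"}
--     result = ""
--     for place in (1000, 100, 10, 1):
--         d = num // place
--         num = num % place
--         if d == 0:
--             continue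
--         if place == 1000:
--             result += thousands.get(d, units[d] + "せん")
--         elif place == 100:
--             result += hundreds.get(d, units[d] + "ひゃく")
--         elif place == 10:
--             result += ("" if d == 1 else units[d]) + "じゅう"
--         else:
--             result += units[d]
--     return result
-- ===== Notes on version B (the rewrite author's own statement) =====
-- stated objective: alternative
-- what changed: Replaces the recursion on the remainder (with per-range branch ladders) by a single iterative pass over the place magnitudes [1000,100,10,1], appending each digit's segment from lookup tables for the special hundred/thousand pronunciations.
import Mathlib
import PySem

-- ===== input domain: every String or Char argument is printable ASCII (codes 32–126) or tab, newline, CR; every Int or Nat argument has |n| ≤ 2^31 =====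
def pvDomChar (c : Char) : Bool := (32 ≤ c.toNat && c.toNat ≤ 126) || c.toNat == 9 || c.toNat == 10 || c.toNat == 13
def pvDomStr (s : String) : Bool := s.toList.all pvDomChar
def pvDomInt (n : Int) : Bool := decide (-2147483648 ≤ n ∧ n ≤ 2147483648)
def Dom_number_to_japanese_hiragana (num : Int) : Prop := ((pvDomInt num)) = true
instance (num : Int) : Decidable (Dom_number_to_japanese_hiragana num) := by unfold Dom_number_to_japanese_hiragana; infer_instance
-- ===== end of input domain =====

-- B replaces A's recursion on the remainder by a single iterative pass over the
-- place magnitudes [1000,100,10,1] with lookup tables for the special pronunciations (objective: alternative decomposition).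

-- ===== PORT A =====
-- shared constant table (Python A's `units` list; B uses the identical literal)
def pvUnits : List String := ["", "いち", "に", "さん", "よん", "ご", "ろく", "なな", "はち", "きゅう"]
def pvTens : List String := ["", "じゅう", "にじゅう", "さんじゅう", "よんじゅう", "ごじゅう", "ろくじゅう", "ななじゅう", "はちじゅう", "きゅうじゅう"]

def number_to_japanese_hiragana (num : Int) : String :=
  if num = 0 then "ぜろ"
  else if num < 10 then PySem.List.pyGetD pvUnits num ""
  else if num < 100 then
    if PySem.Int.mod num 10 = 0 then PySem.List.pyGetD pvTens (PySem.Int.floordiv num 10) ""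
    else if PySem.Int.floordiv num 10 = 1 then
      "じゅう" ++ PySem.List.pyGetD pvUnits (PySem.Int.mod num 10) ""
    else
      PySem.List.pyGetD pvTens (PySem.Int.floordiv num 10) "" ++ PySem.List.pyGetD pvUnits (PySem.Int.mod num 10) ""
  else if num < 1000 then
    let hundreds_digit := PySem.Int.floordiv num 100
    let remainder := PySem.Int.mod num 100
    let result :=
      if hundreds_digit = 1 then "ひゃく"
      else if hundreds_digit = 3 then "さんびゃく"
      else if hundreds_digit = 6 then "ろっぴゃく"
      else if hundreds_digit = 8 then "はっぴゃく"
      else PySem.List.pyGetD pvUnits hundreds_digit "" ++ "ひゃく"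
    if remainder > 0 then result ++ number_to_japanese_hiragana remainder else result
  else if num < 10000 then
    let thousands_digit := PySem.Int.floordiv num 1000
    let remainder := PySem.Int.mod num 1000
    let result :=
      if thousands_digit = 1 then "せん"
      else if thousands_digit = 3 then "さんぜん"
      else if thousands_digit = 8 then "はっせん"
      else PySem.List.pyGetD pvUnits thousands_digit "" ++ "せん"
    if remainder > 0 then result ++ number_to_japanese_hiragana remainder else result
  else "いちまん"
termination_by num.toNat
decreasing_by
  · have h1 := PySem.Int.mod_eq_emod_of_pos (a := num) (b := 100) (by norm_num)
    rw [h1] at *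
    omega
  · have h1 := PySem.Int.mod_eq_emod_of_pos (a := num) (b := 1000) (by norm_num)
    rw [h1] at *
    omega

-- ===== PORT B =====
def pvHundreds : PySem.Dict Int String :=
  PySem.Dict.mk [(1, "ひゃく"), (3, "さんびゃく"), (6, "ろっぴゃく"), (8, "はっぴゃく")]
def pvThousands : PySem.Dict Int String :=
  PySem.Dict.mk [(1, "せん"), (3, "さんぜん"), (8, "はっせん")]

def pvStep (st : Int × String) (place : Int) : Int × String :=
  let d := PySem.Int.floordiv st.1 place
  let n' := PySem.Int.mod st.1 place
  if d = 0 then (n', st.2)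
  else if place = 1000 then
    (n', st.2 ++ PySem.Dict.getD pvThousands d (PySem.List.pyGetD pvUnits d "" ++ "せん"))
  else if place = 100 then
    (n', st.2 ++ PySem.Dict.getD pvHundreds d (PySem.List.pyGetD pvUnits d "" ++ "ひゃく"))
  else if place = 10 then
    (n', st.2 ++ (if d = 1 then "" else PySem.List.pyGetD pvUnits d "") ++ "じゅう")
  else (n', st.2 ++ PySem.List.pyGetD pvUnits d "")

def number_to_japanese_hiragana_alt (num : Int) : String :=
  if num = 0 then "ぜろ"
  else if num < 10 then PySem.List.pyGetD pvUnits num ""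
  else if num ≥ 10000 then "いちまん"
  else (([1000, 100, 10, 1] : List Int).foldl pvStep (num, "")).2

-- ===== PRECONDITION & SPEC =====
-- Pre_ excludes exactly num < -10, where Python A raises IndexError (units[num] with num below -10).
def Pre_number_to_japanese_hiragana (num : Int) : Prop := -10 ≤ num
instance (num : Int) : Decidable (Pre_number_to_japanese_hiragana num) := by
  unfold Pre_number_to_japanese_hiragana; infer_instance
def pvWitness_number_to_japanese_hiragana : Int := 1234

def Spec_number_to_japanese_hiragana (num : Int) (out : String) : Prop := out = number_to_japanese_hiragana_alt num
instance (num : Int) (out : String) : Decidable (Spec_number_to_japanese_hiragana num out) := by unfold Spec_number_to_japanese_hiragana; infer_instance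

-- ===== CLAIM (what is proved, stated in full; the proofs are below) =====
def Claim_equal_number_to_japanese_hiragana : Prop := ∀ (num : Int), Dom_number_to_japanese_hiragana num → Pre_number_to_japanese_hiragana num → Spec_number_to_japanese_hiragana num (number_to_japanese_hiragana num)


-- digit-segment helpers for the proofs (Lean's ediv/emod agree with Python's // % for positive divisors)
def segU (d : Int) : String := if d = 0 then "" else PySem.List.pyGetD pvUnits d ""
def segT (d : Int) : String := if d = 0 then "" else (if d = 1 then "" else PySem.List.pyGetD pvUnits d "") ++ "じゅう"
def segH (d : Int) : String := if d = 0 then "" else PySem.Dict.getD pvHundreds d (PySem.List.pyGetD pvUnits d "" ++ "ひゃく")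
def segK (d : Int) : String := if d = 0 then "" else PySem.Dict.getD pvThousands d (PySem.List.pyGetD pvUnits d "" ++ "せん")

-- ===== LEMMAS AND PROOFS =====

lemma tens_eq (d : Int) (h1 : 1 ≤ d) (h9 : d ≤ 9) :
    PySem.List.pyGetD pvTens d "" = (if d = 1 then "" else PySem.List.pyGetD pvUnits d "") ++ "じゅう" := by
  interval_cases d <;> decide

lemma hund_eq (d : Int) (h1 : 1 ≤ d) (h9 : d ≤ 9) :
    (if d = 1 then "ひゃく" else if d = 3 then "さんびゃく" else if d = 6 then "ろっぴゃく"
     else if d = 8 then "はっぴゃく" else PySem.List.pyGetD pvUnits d "" ++ "ひゃく")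
    = segH d := by
  interval_cases d <;> decide

lemma thou_eq (d : Int) (h1 : 1 ≤ d) (h9 : d ≤ 9) :
    (if d = 1 then "せん" else if d = 3 then "さんぜん" else if d = 8 then "はっせん"
     else PySem.List.pyGetD pvUnits d "" ++ "せん")
    = segK d := by
  interval_cases d <;> decide

lemma A_units (num : Int) (h1 : 1 ≤ num) (h9 : num ≤ 9) :
    number_to_japanese_hiragana num = segU num := by
  rw [number_to_japanese_hiragana, segU,
    if_neg (by omega : ¬num = 0), if_pos (by omega : num < 10), if_neg (by omega : ¬num = 0)]

lemma A_tens (num : Int) (h1 : 10 ≤ num) (h9 : num ≤ 99) :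
    number_to_japanese_hiragana num = segT (num / 10) ++ segU (num % 10) := by
  rw [number_to_japanese_hiragana,
    if_neg (by omega : ¬num = 0), if_neg (by omega : ¬num < 10), if_pos (by omega : num < 100),
    PySem.Int.mod_eq_emod_of_pos (by norm_num : (0:Int) < 10),
    PySem.Int.floordiv_eq_ediv_of_pos (by norm_num : (0:Int) < 10)]
  have hd1 : 1 ≤ num / 10 := by omega
  have hd9 : num / 10 ≤ 9 := by omega
  by_cases hm : num % 10 = 0
  · rw [if_pos hm, segT, segU, if_neg (by omega : ¬num / 10 = 0), if_pos hm,
      String.append_empty, tens_eq _ hd1 hd9]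
  · rw [if_neg hm, segT, segU, if_neg (by omega : ¬num / 10 = 0), if_neg hm]
    by_cases hd : num / 10 = 1
    · simp only [if_pos hd, String.empty_append]
    · simp only [if_neg hd]
      rw [tens_eq _ hd1 hd9, if_neg hd]

lemma A_hund (num : Int) (h1 : 100 ≤ num) (h9 : num ≤ 999) :
    number_to_japanese_hiragana num = segH (num / 100) ++ (segT (num % 100 / 10) ++ segU (num % 10)) := by
  rw [number_to_japanese_hiragana,
    if_neg (by omega : ¬num = 0), if_neg (by omega : ¬num < 10), if_neg (by omega : ¬num < 100),
    if_pos (by omega : num < 1000),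
    PySem.Int.mod_eq_emod_of_pos (by norm_num : (0:Int) < 100),
    PySem.Int.floordiv_eq_ediv_of_pos (by norm_num : (0:Int) < 100)]
  dsimp only
  rw [hund_eq (num / 100) (by omega) (by omega)]
  have hmm : num % 100 % 10 = num % 10 := Int.emod_emod_of_dvd num (by norm_num)
  by_cases hr : 0 < num % 100
  · rw [if_pos hr]
    rcases lt_or_ge (num % 100) 10 with hlt | hge
    · rw [A_units (num % 100) (by omega) (by omega)]
      have e2 : num % 100 / 10 = 0 := by omega
      have e3 : num % 100 = num % 10 := by omega
      rw [e2, e3, segT, if_pos rfl, String.empty_append]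
    · rw [A_tens (num % 100) (by omega) (by omega), hmm]
  · rw [if_neg hr]
    have h100 : num % 100 = 0 := by omega
    have h10 : num % 10 = 0 := by omega
    rw [h100, segT, segU, if_pos (by norm_num : (0:Int) / 10 = 0), if_pos h10,
      String.empty_append, String.append_empty]

lemma A_thou (num : Int) (h1 : 1000 ≤ num) (h9 : num ≤ 9999) :
    number_to_japanese_hiragana num
      = segK (num / 1000) ++ (segH (num % 1000 / 100) ++ (segT (num % 100 / 10) ++ segU (num % 10))) := by
  rw [number_to_japanese_hiragana,
    if_neg (by omega : ¬num = 0), if_neg (by omega : ¬num < 10), if_neg (by omega : ¬num < 100),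
    if_neg (by omega : ¬num < 1000), if_pos (by omega : num < 10000),
    PySem.Int.mod_eq_emod_of_pos (by norm_num : (0:Int) < 1000),
    PySem.Int.floordiv_eq_ediv_of_pos (by norm_num : (0:Int) < 1000)]
  dsimp only
  rw [thou_eq (num / 1000) (by omega) (by omega)]
  have hm100 : num % 1000 % 100 = num % 100 := Int.emod_emod_of_dvd num (by norm_num)
  have hm10 : num % 1000 % 10 = num % 10 := Int.emod_emod_of_dvd num (by norm_num)
  by_cases hr : 0 < num % 1000
  · rw [if_pos hr]
    rcases lt_or_ge (num % 1000) 10 with hlt | hge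
    · rw [A_units (num % 1000) (by omega) (by omega)]
      have e1 : num % 1000 / 100 = 0 := by omega
      have e2 : num % 100 / 10 = 0 := by
        have : num % 100 = num % 1000 := by omega
        omega
      have e3 : num % 10 = num % 1000 := by omega
      rw [e1, e2, e3, segH, segT, if_pos rfl, if_pos rfl, String.empty_append, String.empty_append]
    · rcases lt_or_ge (num % 1000) 100 with hlt2 | hge2
      · rw [A_tens (num % 1000) (by omega) (by omega)]
        have e1 : num % 1000 / 100 = 0 := by omega
        have e2 : num % 1000 / 10 = num % 100 / 10 := by
          have : num % 100 = num % 1000 := by omega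
          omega
        rw [e1, segH, if_pos rfl, String.empty_append, e2, hm10]
      · rw [A_hund (num % 1000) (by omega) (by omega), hm100, hm10]
  · rw [if_neg hr]
    have e0 : num % 1000 = 0 := by omega
    have e1 : num % 100 = 0 := by omega
    have e2 : num % 10 = 0 := by omega
    rw [e0, e1, e2, segH, segT, segU, if_pos (by norm_num : (0:Int) / 100 = 0),
      if_pos (by norm_num : (0:Int) / 10 = 0), if_pos rfl,
      String.empty_append, String.empty_append, String.append_empty]

lemma step1000 (n : Int) (s : String) :
    pvStep (n, s) 1000 = (n % 1000, s ++ segK (n / 1000)) := by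
  simp only [pvStep,
    PySem.Int.mod_eq_emod_of_pos (b := 1000) (by norm_num),
    PySem.Int.floordiv_eq_ediv_of_pos (b := 1000) (by norm_num)]
  by_cases hd : n / 1000 = 0
  · simp [hd, segK]
  · simp [hd, segK]

lemma step100 (n : Int) (s : String) :
    pvStep (n, s) 100 = (n % 100, s ++ segH (n / 100)) := by
  simp only [pvStep,
    PySem.Int.mod_eq_emod_of_pos (b := 100) (by norm_num),
    PySem.Int.floordiv_eq_ediv_of_pos (b := 100) (by norm_num)]
  by_cases hd : n / 100 = 0
  · simp [hd, segH]
  · simp [hd, segH]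

lemma step10 (n : Int) (s : String) :
    pvStep (n, s) 10 = (n % 10, s ++ segT (n / 10)) := by
  simp only [pvStep,
    PySem.Int.mod_eq_emod_of_pos (b := 10) (by norm_num),
    PySem.Int.floordiv_eq_ediv_of_pos (b := 10) (by norm_num)]
  by_cases hd : n / 10 = 0
  · simp [hd, segT]
  · simp [hd, segT, String.append_assoc]

lemma step1 (n : Int) (s : String) :
    pvStep (n, s) 1 = (0, s ++ segU n) := by
  simp only [pvStep,
    PySem.Int.mod_eq_emod_of_pos (b := 1) (by norm_num),
    PySem.Int.floordiv_eq_ediv_of_pos (b := 1) (by norm_num), Int.ediv_one, Int.emod_one]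
  by_cases hd : n = 0
  · simp [hd, segU]
  · simp [hd, segU]

lemma B_loop (num : Int) :
    (([1000, 100, 10, 1] : List Int).foldl pvStep (num, "")).2
      = segK (num / 1000) ++ (segH (num % 1000 / 100) ++ (segT (num % 100 / 10) ++ segU (num % 10))) := by
  have hm100 : num % 1000 % 100 = num % 100 := Int.emod_emod_of_dvd num (by norm_num)
  have hm10 : num % 100 % 10 = num % 10 := Int.emod_emod_of_dvd num (by norm_num)
  simp only [List.foldl]
  rw [step1000, step100, hm100, step10, hm10, step1, String.empty_append,
    String.append_assoc, String.append_assoc]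

-- ===== VERDICT (by name: the statement is the Claim_ definition above) =====
theorem number_to_japanese_hiragana_spec : Claim_equal_number_to_japanese_hiragana := by
  intro num _ hpre
  unfold Spec_number_to_japanese_hiragana
  by_cases h0 : num = 0
  · rw [number_to_japanese_hiragana, number_to_japanese_hiragana_alt, if_pos h0, if_pos h0]
  · by_cases hlt : num < 10
    · rw [number_to_japanese_hiragana, number_to_japanese_hiragana_alt,
        if_neg h0, if_neg h0, if_pos hlt, if_pos hlt]
    · by_cases hbig : 10000 ≤ num
      · rw [number_to_japanese_hiragana, number_to_japanese_hiragana_alt,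
          if_neg h0, if_neg h0, if_neg hlt, if_neg hlt,
          if_neg (by omega : ¬num < 100), if_neg (by omega : ¬num < 1000),
          if_neg (by omega : ¬num < 10000), if_pos (by omega : num ≥ 10000)]
      · rw [number_to_japanese_hiragana_alt, if_neg h0, if_neg hlt,
          if_neg (by omega : ¬num ≥ 10000), B_loop]
        rcases lt_or_ge num 100 with h | h
        · have e1 : num / 1000 = 0 := by omega
          have e2 : num % 1000 = num := Int.emod_eq_of_lt (by omega) (by omega)
          have e3 : num / 100 = 0 := by omega
          have e4 : num % 100 = num := Int.emod_eq_of_lt (by omega) (by omega)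
          rw [A_tens num (by omega) (by omega), e1, e2, e3, e4, segK, segH,
            if_pos rfl, if_pos rfl, String.empty_append, String.empty_append]
        · rcases lt_or_ge num 1000 with h2 | h2
          · have e1 : num / 1000 = 0 := by omega
            have e2 : num % 1000 = num := Int.emod_eq_of_lt (by omega) (by omega)
            rw [A_hund num (by omega) (by omega), e1, e2, segK, if_pos rfl, String.empty_append]
          · exact A_thou num (by omega) (by omega)
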